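-- pv_equiv track=rewrite | github.com/gmao-ckung/advent_of_code | 2020/day11.py | search_occ_W
-- ===== SOURCE A (Python) =====
-- def search_occ_W(startRow, startCol, layout):
--     currCol = startCol - 1
--     while currCol > 0:
--         if layout[startRow][currCol] == '#':
--             return True
--         elif layout[startRow][currCol] == 'L':
--             return False
--         else:
--             currCol = currCol - 1
--     return False
-- ===== SOURCE B (Python) =====
-- def search_occ_W(startRow, startCol, layout):
--     if startCol <= 1:
--         return False
--     seg = layout[startRow][1:startCol]
--     h = -1
--     l = -1
--     i = 0
--     for c in seg:
--         if c == '#':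
--             h = i
--         elif c == 'L':
--             l = i
--         i += 1
--     return h > l
-- ===== Notes on version B (the rewrite author's own statement) =====
-- stated objective: alternative
-- what changed: Replaces A's early-exit westward scan (while-loop from column startCol-1 down to 1) by slicing the westward segment row[1:startCol] and one forward fold that records the last-seen positions of '#' and 'L', returning whether the occupied seat is nearer.
-- outside the precondition, e.g. on search_occ_W(0, 5, [['L', '.', '#']]): A raises IndexError, B returns True; on search_occ_W(2, 2, [['#', '#']]): A raises IndexError, B raises IndexError
import Mathlib
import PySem

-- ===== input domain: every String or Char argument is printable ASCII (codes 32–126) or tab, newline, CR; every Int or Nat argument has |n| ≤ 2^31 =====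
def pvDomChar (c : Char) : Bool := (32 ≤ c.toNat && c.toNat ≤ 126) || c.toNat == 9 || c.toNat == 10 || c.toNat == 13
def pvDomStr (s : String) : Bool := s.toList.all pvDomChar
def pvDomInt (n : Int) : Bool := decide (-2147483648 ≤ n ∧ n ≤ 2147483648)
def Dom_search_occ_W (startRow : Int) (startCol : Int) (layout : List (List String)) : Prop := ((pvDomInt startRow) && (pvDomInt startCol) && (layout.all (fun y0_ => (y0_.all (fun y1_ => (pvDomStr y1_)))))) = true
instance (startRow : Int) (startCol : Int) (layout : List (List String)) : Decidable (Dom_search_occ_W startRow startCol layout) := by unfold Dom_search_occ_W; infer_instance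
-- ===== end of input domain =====

-- B replaces A's early-exit westward while-loop by a slice and one forward fold
-- recording the last-seen positions of '#' and 'L' (objective: alternative, same cost).

-- ===== PORT A =====
-- A's while-loop: currCol from startCol-1 down while currCol > 0; '#' → True, 'L' → False.
-- pyGet? none = IndexError (Python raises; excluded by Pre_); the loop decreases currCol.
def pvALoop (layout : List (List String)) (startRow : Int) (currCol : Int) : Bool :=
  if _hpos : currCol > 0 then
    match PySem.List.pyGet? layout startRow with
    | none => false
    | some row =>
      match PySem.List.pyGet? row currCol with
      | none => false
      | some c =>
        if c = "#" then true
        else if c = "L" then false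
        else pvALoop layout startRow (currCol - 1)
  else false
termination_by currCol.toNat
decreasing_by omega

def search_occ_W (startRow : Int) (startCol : Int) (layout : List (List String)) : Bool :=
  pvALoop layout startRow (startCol - 1)

-- ===== PORT B =====
-- step of B's for-loop over the westward segment: state (h, l, i)
def pvBStep (st : Int × Int × Int) (c : String) : Int × Int × Int :=
  if c = "#" then (st.2.2, st.2.1, st.2.2 + 1)
  else if c = "L" then (st.1, st.2.2, st.2.2 + 1)
  else (st.1, st.2.1, st.2.2 + 1)

def search_occ_W_alt (startRow : Int) (startCol : Int) (layout : List (List String)) : Bool :=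
  if startCol ≤ 1 then false
  else
    match PySem.List.pyGet? layout startRow with
    | none => false   -- IndexError in Python; excluded by Pre_
    | some row =>
      let seg := PySem.List.slice row (some 1) (some startCol)
      let s := seg.foldl pvBStep (-1, -1, 0)
      decide (s.2.1 < s.1)

-- ===== PRECONDITION & SPEC =====
-- Pre_ excludes exactly the inputs where Python A raises IndexError: startCol ≥ 2 with an
-- out-of-range startRow, or a row shorter than startCol (A indexes row[startCol-1] first).
def Pre_search_occ_W (startRow : Int) (startCol : Int) (layout : List (List String)) : Prop :=
  startCol ≤ 1 ∨
    ((PySem.List.pyGet? layout startRow).any (fun row => decide (startCol ≤ (row.length : Int))) = true)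
instance (startRow : Int) (startCol : Int) (layout : List (List String)) : Decidable (Pre_search_occ_W startRow startCol layout) := by unfold Pre_search_occ_W; infer_instance

def pvWitness_search_occ_W : Int × Int × List (List String) := (0, 3, [["L", ".", "#", "."]])

def Spec_search_occ_W (startRow : Int) (startCol : Int) (layout : List (List String)) (out : Bool) : Prop := out = search_occ_W_alt startRow startCol layout
instance (startRow : Int) (startCol : Int) (layout : List (List String)) (out : Bool) : Decidable (Spec_search_occ_W startRow startCol layout out) := by unfold Spec_search_occ_W; infer_instance

-- ===== CLAIM (what is proved, stated in full; the proofs are below) =====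
def Claim_equal_search_occ_W : Prop := ∀ (startRow : Int) (startCol : Int) (layout : List (List String)), Dom_search_occ_W startRow startCol layout → Pre_search_occ_W startRow startCol layout → Spec_search_occ_W startRow startCol layout (search_occ_W startRow startCol layout)

-- ===== LEMMAS AND PROOFS =====

-- invariant of B's fold: the index component counts, and both positions stay below it
theorem pvBFold_inv (xs : List String) (h l i : Int) (hh : h < i) (hl : l < i) :
    (xs.foldl pvBStep (h, l, i)).2.2 = i + xs.length ∧
    (xs.foldl pvBStep (h, l, i)).1 < (xs.foldl pvBStep (h, l, i)).2.2 ∧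
    (xs.foldl pvBStep (h, l, i)).2.1 < (xs.foldl pvBStep (h, l, i)).2.2 := by
  induction xs generalizing h l i with
  | nil => simpa using ⟨hh, hl⟩
  | cons c cs ih =>
    simp only [List.foldl_cons, pvBStep, List.length_cons]
    split_ifs with h1 h2
    · obtain ⟨e1, e2, e3⟩ := ih i l (i + 1) (by omega) (by omega)
      refine ⟨?_, e2, e3⟩; rw [e1]; push_cast; ring
    · obtain ⟨e1, e2, e3⟩ := ih h i (i + 1) (by omega) (by omega)
      refine ⟨?_, e2, e3⟩; rw [e1]; push_cast; ring
    · obtain ⟨e1, e2, e3⟩ := ih h l (i + 1) (by omega) (by omega)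
      refine ⟨?_, e2, e3⟩; rw [e1]; push_cast; ring

-- A's downward scan from column n equals B's last-position comparison on the first n
-- cells of the westward tail
theorem pvKey (layout : List (List String)) (startRow : Int) (row : List String)
    (hrow : PySem.List.pyGet? layout startRow = some row) :
    ∀ n : Nat, n < row.length →
      pvALoop layout startRow (n : Int) =
        decide ((((row.drop 1).take n).foldl pvBStep (-1, -1, 0)).2.1 <
                (((row.drop 1).take n).foldl pvBStep (-1, -1, 0)).1) := by
  intro n
  induction n with
  | zero => intro _; unfold pvALoop; simp
  | succ n ih =>
    intro hlt
    have hn : n < (row.drop 1).length := by simpa using (by omega : n < row.length - 1)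
    have hget : (row.drop 1)[n]? = some ((row.drop 1)[n]'hn) := List.getElem?_eq_getElem hn
    have htake : (row.drop 1).take (n + 1) = (row.drop 1).take n ++ [(row.drop 1)[n]'hn] := by
      rw [List.take_add_one, hget]; rfl
    have hlen : ((row.drop 1).take n).length = n := by
      rw [List.length_take]; omega
    obtain ⟨e1, e2, e3⟩ := pvBFold_inv ((row.drop 1).take n) (-1) (-1) 0 (by omega) (by omega)
    rw [hlen] at e1
    have hi : (((row.drop 1).take n).foldl pvBStep (-1, -1, 0)).2.2 = (n : Int) := by
      rw [e1]; ring
    have hcell : PySem.List.pyGet? row ((n : Int) + 1) = some ((row.drop 1)[n]'hn) := by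
      have : ((n : Int) + 1) = ((n + 1 : Nat) : Int) := by push_cast; ring
      rw [this, PySem.List.pyGet?_natCast, List.getElem?_eq_getElem hlt]
      congr 1
      simp
    unfold pvALoop
    rw [dif_pos (by push_cast; omega : ((n + 1 : Nat) : Int) > 0), hrow]
    dsimp only
    have hc1 : ((n + 1 : Nat) : Int) = (n : Int) + 1 := by push_cast; ring
    rw [hc1, hcell]
    rw [htake, List.foldl_append]
    set S := ((row.drop 1).take n).foldl pvBStep (-1, -1, 0) with hS
    simp only [List.foldl_cons, List.foldl_nil]
    by_cases h1 : (row.drop 1)[n]'hn = "#"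
    · rw [if_pos h1]
      symm; rw [decide_eq_true_iff]
      simp only [pvBStep, if_pos h1]
      omega
    · rw [if_neg h1]
      by_cases h2 : (row.drop 1)[n]'hn = "L"
      · rw [if_pos h2]
        symm; rw [decide_eq_false_iff_not]
        simp only [pvBStep, if_neg h1, if_pos h2]
        omega
      · rw [if_neg h2]
        simp only [pvBStep, if_neg h1, if_neg h2]
        have hm1 : (n : Int) + 1 - 1 = (n : Int) := by ring
        rw [hm1]
        exact ih (by omega)

-- ===== VERDICT (by name: the statement is the Claim_ definition above) =====
theorem search_occ_W_spec : Claim_equal_search_occ_W := by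
  intro startRow startCol layout _ hpre
  unfold Spec_search_occ_W search_occ_W search_occ_W_alt
  by_cases hc : startCol ≤ 1
  · rw [if_pos hc]
    unfold pvALoop
    rw [dif_neg (by omega)]
  · rw [if_neg hc]
    rcases hpre with h | h
    · omega
    · cases hrow : PySem.List.pyGet? layout startRow with
      | none => rw [hrow] at h; simp [Option.any] at h
      | some row =>
        rw [hrow] at h
        simp only [Option.any, decide_eq_true_eq] at h
        have hsc : 2 ≤ startCol := by omega
        have hslice : PySem.List.slice row (some 1) (some startCol) =
            (row.drop 1).take (startCol.toNat - 1) := by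
          rw [PySem.List.slice_toNat row (by omega) (by omega)]
          norm_num
        set n : Nat := startCol.toNat - 1 with hn
        have hcast : startCol - 1 = (n : Int) := by omega
        have hltn : n < row.length := by omega
        rw [hcast, pvKey layout startRow row hrow n hltn]
        dsimp only
        rw [hslice]
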